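-- pv_equiv track=rewrite | github.com/tejastro123/Farmer-Friend-Bot | backend/services/hyperlocal.py | get_regional_context_by_state
-- ===== SOURCE A (Python) =====
-- REGIONAL_DATA = {
--     "north": {
--         "states": ["Punjab", "Haryana", "Himachal Pradesh", "Jammu and Kashmir", "Uttarakhand"],
--         "patterns": "Rice-Wheat cycle is dominant. High reliance on canal irrigation.",
--         "sowing_window": "May-June (Kharif), Oct-Nov (Rabi)."
--     },
--     "west": {
--         "states": ["Maharashtra", "Gujarat", "Rajasthan", "Goa"],
--         "patterns": "Cotton, Sugarcane, and Oilseed focus. Reliance on monsoon and borewells.",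
--         "sowing_window": "June-July (monsoon onset)."
--     },
--     "south": {
--         "states": ["Karnataka", "Tamil Nadu", "Andhra Pradesh", "Telangana", "Kerala"],
--         "patterns": "Rice, Spices, and Plantation crops. Multi-cropping is common.",
--         "sowing_window": "Year-round due to tropical climate."
--     },
--     "east": {
--         "states": ["West Bengal", "Bihar", "Odisha", "Jharkhand", "Assam"],
--         "patterns": "Jute, Rice, and Tea. High rainfall and flood-prone reasoning.",
--         "sowing_window": "April-May (Jute), June-July (Rice)."
--     },
--     "central": {
--         "states": ["Madhya Pradesh", "Chhattisgarh"],
--         "patterns": "Soybean and Pulse hub. Rainfed agriculture.",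
--         "sowing_window": "Late June onwards."
--     }
-- }
--
-- def get_regional_context_by_state(state_name: str) -> str:
--     """Maps a state to its agricultural zone logic for regional tailoring."""
--     s = state_name.title().strip()
--     for zone, data in REGIONAL_DATA.items():
--         if s in data["states"]:
--             return (
--                 f"Agricultural Zone: {zone.upper()} India\n"
--                 f"- Primary State: {s}\n"
--                 f"- Regional Pattern: {data['patterns']}\n"
--                 f"- Typical Sowing Times: {data['sowing_window']}"
--             )
--     return f"Regional Context: {state_name}. Provide general advice based on India-wide patterns."
-- ===== SOURCE B (Python) =====
-- # Precomputed state -> full response table; one dict lookup per call, no zone scan or formatting.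
-- RESPONSES = {
--     'Punjab': 'Agricultural Zone: NORTH India\n- Primary State: Punjab\n- Regional Pattern: Rice-Wheat cycle is dominant. High reliance on canal irrigation.\n- Typical Sowing Times: May-June (Kharif), Oct-Nov (Rabi).',
--     'Haryana': 'Agricultural Zone: NORTH India\n- Primary State: Haryana\n- Regional Pattern: Rice-Wheat cycle is dominant. High reliance on canal irrigation.\n- Typical Sowing Times: May-June (Kharif), Oct-Nov (Rabi).',
--     'Himachal Pradesh': 'Agricultural Zone: NORTH India\n- Primary State: Himachal Pradesh\n- Regional Pattern: Rice-Wheat cycle is dominant. High reliance on canal irrigation.\n- Typical Sowing Times: May-June (Kharif), Oct-Nov (Rabi).',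
--     'Jammu and Kashmir': 'Agricultural Zone: NORTH India\n- Primary State: Jammu and Kashmir\n- Regional Pattern: Rice-Wheat cycle is dominant. High reliance on canal irrigation.\n- Typical Sowing Times: May-June (Kharif), Oct-Nov (Rabi).',
--     'Uttarakhand': 'Agricultural Zone: NORTH India\n- Primary State: Uttarakhand\n- Regional Pattern: Rice-Wheat cycle is dominant. High reliance on canal irrigation.\n- Typical Sowing Times: May-June (Kharif), Oct-Nov (Rabi).',
--     'Maharashtra': 'Agricultural Zone: WEST India\n- Primary State: Maharashtra\n- Regional Pattern: Cotton, Sugarcane, and Oilseed focus. Reliance on monsoon and borewells.\n- Typical Sowing Times: June-July (monsoon onset).',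
--     'Gujarat': 'Agricultural Zone: WEST India\n- Primary State: Gujarat\n- Regional Pattern: Cotton, Sugarcane, and Oilseed focus. Reliance on monsoon and borewells.\n- Typical Sowing Times: June-July (monsoon onset).',
--     'Rajasthan': 'Agricultural Zone: WEST India\n- Primary State: Rajasthan\n- Regional Pattern: Cotton, Sugarcane, and Oilseed focus. Reliance on monsoon and borewells.\n- Typical Sowing Times: June-July (monsoon onset).',
--     'Goa': 'Agricultural Zone: WEST India\n- Primary State: Goa\n- Regional Pattern: Cotton, Sugarcane, and Oilseed focus. Reliance on monsoon and borewells.\n- Typical Sowing Times: June-July (monsoon onset).',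
--     'Karnataka': 'Agricultural Zone: SOUTH India\n- Primary State: Karnataka\n- Regional Pattern: Rice, Spices, and Plantation crops. Multi-cropping is common.\n- Typical Sowing Times: Year-round due to tropical climate.',
--     'Tamil Nadu': 'Agricultural Zone: SOUTH India\n- Primary State: Tamil Nadu\n- Regional Pattern: Rice, Spices, and Plantation crops. Multi-cropping is common.\n- Typical Sowing Times: Year-round due to tropical climate.',
--     'Andhra Pradesh': 'Agricultural Zone: SOUTH India\n- Primary State: Andhra Pradesh\n- Regional Pattern: Rice, Spices, and Plantation crops. Multi-cropping is common.\n- Typical Sowing Times: Year-round due to tropical climate.',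
--     'Telangana': 'Agricultural Zone: SOUTH India\n- Primary State: Telangana\n- Regional Pattern: Rice, Spices, and Plantation crops. Multi-cropping is common.\n- Typical Sowing Times: Year-round due to tropical climate.',
--     'Kerala': 'Agricultural Zone: SOUTH India\n- Primary State: Kerala\n- Regional Pattern: Rice, Spices, and Plantation crops. Multi-cropping is common.\n- Typical Sowing Times: Year-round due to tropical climate.',
--     'West Bengal': 'Agricultural Zone: EAST India\n- Primary State: West Bengal\n- Regional Pattern: Jute, Rice, and Tea. High rainfall and flood-prone reasoning.\n- Typical Sowing Times: April-May (Jute), June-July (Rice).',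
--     'Bihar': 'Agricultural Zone: EAST India\n- Primary State: Bihar\n- Regional Pattern: Jute, Rice, and Tea. High rainfall and flood-prone reasoning.\n- Typical Sowing Times: April-May (Jute), June-July (Rice).',
--     'Odisha': 'Agricultural Zone: EAST India\n- Primary State: Odisha\n- Regional Pattern: Jute, Rice, and Tea. High rainfall and flood-prone reasoning.\n- Typical Sowing Times: April-May (Jute), June-July (Rice).',
--     'Jharkhand': 'Agricultural Zone: EAST India\n- Primary State: Jharkhand\n- Regional Pattern: Jute, Rice, and Tea. High rainfall and flood-prone reasoning.\n- Typical Sowing Times: April-May (Jute), June-July (Rice).',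
--     'Assam': 'Agricultural Zone: EAST India\n- Primary State: Assam\n- Regional Pattern: Jute, Rice, and Tea. High rainfall and flood-prone reasoning.\n- Typical Sowing Times: April-May (Jute), June-July (Rice).',
--     'Madhya Pradesh': 'Agricultural Zone: CENTRAL India\n- Primary State: Madhya Pradesh\n- Regional Pattern: Soybean and Pulse hub. Rainfed agriculture.\n- Typical Sowing Times: Late June onwards.',
--     'Chhattisgarh': 'Agricultural Zone: CENTRAL India\n- Primary State: Chhattisgarh\n- Regional Pattern: Soybean and Pulse hub. Rainfed agriculture.\n- Typical Sowing Times: Late June onwards.',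
-- }
--
-- def get_regional_context_by_state(state_name: str) -> str:
--     """Maps a state to its agricultural zone logic for regional tailoring."""
--     s = state_name.title().strip()
--     hit = RESPONSES.get(s)
--     if hit is not None:
--         return hit
--     return f"Regional Context: {state_name}. Provide general advice based on India-wide patterns."
-- ===== Notes on version B (the rewrite author's own statement) =====
-- stated objective: alternative
-- what changed: B replaces A's per-call scan over the zone table and per-call f-string formatting with a module-level precomputed state-to-full-response table and a single dict lookup; both are dominated by .title() on the input, so no speed is claimed.
import Mathlib
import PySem

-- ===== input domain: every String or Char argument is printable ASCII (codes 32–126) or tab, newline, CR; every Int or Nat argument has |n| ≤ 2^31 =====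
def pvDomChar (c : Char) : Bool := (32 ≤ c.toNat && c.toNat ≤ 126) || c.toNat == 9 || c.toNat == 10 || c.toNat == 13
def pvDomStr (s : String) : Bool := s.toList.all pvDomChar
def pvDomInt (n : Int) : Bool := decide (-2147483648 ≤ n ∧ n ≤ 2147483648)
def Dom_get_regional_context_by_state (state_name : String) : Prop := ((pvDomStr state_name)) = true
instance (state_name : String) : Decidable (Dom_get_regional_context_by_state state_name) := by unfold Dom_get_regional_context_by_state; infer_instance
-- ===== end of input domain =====

-- B replaces A's per-call scan over the zone table (and its per-call string formatting) by a
-- precomputed state → full-response table looked up once per call (objective: alternative).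

-- str.title(), hand-ported step for step; exact on the ASCII domain (Char.isAlpha/toUpper/toLower
-- agree with Python's cased-character rules for ASCII).
def pvTitleChars : Bool → List Char → List Char
  | _, [] => []
  | prevAlpha, c :: rest =>
    let isA := c.isAlpha
    let c' := if isA then (if prevAlpha then c.toLower else c.toUpper) else c
    c' :: pvTitleChars isA rest

def pvTitle (s : String) : String := String.ofList (pvTitleChars false s.toList)

-- ===== PORT A =====
-- REGIONAL_DATA as an insertion-ordered assoc list: zone ↦ (states, patterns, sowing_window)
def pvRegionalData : List (String × (List String × String × String)) :=
  [("north", (["Punjab", "Haryana", "Himachal Pradesh", "Jammu and Kashmir", "Uttarakhand"],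
      "Rice-Wheat cycle is dominant. High reliance on canal irrigation.",
      "May-June (Kharif), Oct-Nov (Rabi).")),
   ("west", (["Maharashtra", "Gujarat", "Rajasthan", "Goa"],
      "Cotton, Sugarcane, and Oilseed focus. Reliance on monsoon and borewells.",
      "June-July (monsoon onset).")),
   ("south", (["Karnataka", "Tamil Nadu", "Andhra Pradesh", "Telangana", "Kerala"],
      "Rice, Spices, and Plantation crops. Multi-cropping is common.",
      "Year-round due to tropical climate.")),
   ("east", (["West Bengal", "Bihar", "Odisha", "Jharkhand", "Assam"],
      "Jute, Rice, and Tea. High rainfall and flood-prone reasoning.",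
      "April-May (Jute), June-July (Rice).")),
   ("central", (["Madhya Pradesh", "Chhattisgarh"],
      "Soybean and Pulse hub. Rainfed agriculture.",
      "Late June onwards."))]

-- the f-string of A's matched branch
def pvFmt (zone s patterns sw : String) : String :=
  "Agricultural Zone: " ++ PySem.Str.upper zone ++ " India\n- Primary State: " ++ s ++
  "\n- Regional Pattern: " ++ patterns ++ "\n- Typical Sowing Times: " ++ sw

-- A's for-loop over REGIONAL_DATA.items() with early return
def pvScanA (s orig : String) : List (String × (List String × String × String)) → String
  | [] => "Regional Context: " ++ orig ++ ". Provide general advice based on India-wide patterns."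
  | (zone, (states, pat, sw)) :: rest =>
    if states.contains s then pvFmt zone s pat sw else pvScanA s orig rest

def get_regional_context_by_state (state_name : String) : String :=
  let s := PySem.Str.strip (pvTitle state_name)
  pvScanA s state_name pvRegionalData

-- ===== PORT B =====
-- Source B's precomputed RESPONSES table: state ↦ complete formatted response
def pvResponses : List (String × String) :=
  [("Punjab", "Agricultural Zone: NORTH India\n- Primary State: Punjab\n- Regional Pattern: Rice-Wheat cycle is dominant. High reliance on canal irrigation.\n- Typical Sowing Times: May-June (Kharif), Oct-Nov (Rabi)."),
   ("Haryana", "Agricultural Zone: NORTH India\n- Primary State: Haryana\n- Regional Pattern: Rice-Wheat cycle is dominant. High reliance on canal irrigation.\n- Typical Sowing Times: May-June (Kharif), Oct-Nov (Rabi)."),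
   ("Himachal Pradesh", "Agricultural Zone: NORTH India\n- Primary State: Himachal Pradesh\n- Regional Pattern: Rice-Wheat cycle is dominant. High reliance on canal irrigation.\n- Typical Sowing Times: May-June (Kharif), Oct-Nov (Rabi)."),
   ("Jammu and Kashmir", "Agricultural Zone: NORTH India\n- Primary State: Jammu and Kashmir\n- Regional Pattern: Rice-Wheat cycle is dominant. High reliance on canal irrigation.\n- Typical Sowing Times: May-June (Kharif), Oct-Nov (Rabi)."),
   ("Uttarakhand", "Agricultural Zone: NORTH India\n- Primary State: Uttarakhand\n- Regional Pattern: Rice-Wheat cycle is dominant. High reliance on canal irrigation.\n- Typical Sowing Times: May-June (Kharif), Oct-Nov (Rabi)."),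
   ("Maharashtra", "Agricultural Zone: WEST India\n- Primary State: Maharashtra\n- Regional Pattern: Cotton, Sugarcane, and Oilseed focus. Reliance on monsoon and borewells.\n- Typical Sowing Times: June-July (monsoon onset)."),
   ("Gujarat", "Agricultural Zone: WEST India\n- Primary State: Gujarat\n- Regional Pattern: Cotton, Sugarcane, and Oilseed focus. Reliance on monsoon and borewells.\n- Typical Sowing Times: June-July (monsoon onset)."),
   ("Rajasthan", "Agricultural Zone: WEST India\n- Primary State: Rajasthan\n- Regional Pattern: Cotton, Sugarcane, and Oilseed focus. Reliance on monsoon and borewells.\n- Typical Sowing Times: June-July (monsoon onset)."),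
   ("Goa", "Agricultural Zone: WEST India\n- Primary State: Goa\n- Regional Pattern: Cotton, Sugarcane, and Oilseed focus. Reliance on monsoon and borewells.\n- Typical Sowing Times: June-July (monsoon onset)."),
   ("Karnataka", "Agricultural Zone: SOUTH India\n- Primary State: Karnataka\n- Regional Pattern: Rice, Spices, and Plantation crops. Multi-cropping is common.\n- Typical Sowing Times: Year-round due to tropical climate."),
   ("Tamil Nadu", "Agricultural Zone: SOUTH India\n- Primary State: Tamil Nadu\n- Regional Pattern: Rice, Spices, and Plantation crops. Multi-cropping is common.\n- Typical Sowing Times: Year-round due to tropical climate."),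
   ("Andhra Pradesh", "Agricultural Zone: SOUTH India\n- Primary State: Andhra Pradesh\n- Regional Pattern: Rice, Spices, and Plantation crops. Multi-cropping is common.\n- Typical Sowing Times: Year-round due to tropical climate."),
   ("Telangana", "Agricultural Zone: SOUTH India\n- Primary State: Telangana\n- Regional Pattern: Rice, Spices, and Plantation crops. Multi-cropping is common.\n- Typical Sowing Times: Year-round due to tropical climate."),
   ("Kerala", "Agricultural Zone: SOUTH India\n- Primary State: Kerala\n- Regional Pattern: Rice, Spices, and Plantation crops. Multi-cropping is common.\n- Typical Sowing Times: Year-round due to tropical climate."),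
   ("West Bengal", "Agricultural Zone: EAST India\n- Primary State: West Bengal\n- Regional Pattern: Jute, Rice, and Tea. High rainfall and flood-prone reasoning.\n- Typical Sowing Times: April-May (Jute), June-July (Rice)."),
   ("Bihar", "Agricultural Zone: EAST India\n- Primary State: Bihar\n- Regional Pattern: Jute, Rice, and Tea. High rainfall and flood-prone reasoning.\n- Typical Sowing Times: April-May (Jute), June-July (Rice)."),
   ("Odisha", "Agricultural Zone: EAST India\n- Primary State: Odisha\n- Regional Pattern: Jute, Rice, and Tea. High rainfall and flood-prone reasoning.\n- Typical Sowing Times: April-May (Jute), June-July (Rice)."),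
   ("Jharkhand", "Agricultural Zone: EAST India\n- Primary State: Jharkhand\n- Regional Pattern: Jute, Rice, and Tea. High rainfall and flood-prone reasoning.\n- Typical Sowing Times: April-May (Jute), June-July (Rice)."),
   ("Assam", "Agricultural Zone: EAST India\n- Primary State: Assam\n- Regional Pattern: Jute, Rice, and Tea. High rainfall and flood-prone reasoning.\n- Typical Sowing Times: April-May (Jute), June-July (Rice)."),
   ("Madhya Pradesh", "Agricultural Zone: CENTRAL India\n- Primary State: Madhya Pradesh\n- Regional Pattern: Soybean and Pulse hub. Rainfed agriculture.\n- Typical Sowing Times: Late June onwards."),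
   ("Chhattisgarh", "Agricultural Zone: CENTRAL India\n- Primary State: Chhattisgarh\n- Regional Pattern: Soybean and Pulse hub. Rainfed agriculture.\n- Typical Sowing Times: Late June onwards.")]

-- dict.get(s): first pair whose key equals s
def get_regional_context_by_state_alt (state_name : String) : String :=
  let s := PySem.Str.strip (pvTitle state_name)
  match pvResponses.find? (fun p => p.1 == s) with
  | some p => p.2
  | none => "Regional Context: " ++ state_name ++ ". Provide general advice based on India-wide patterns."

-- ===== PRECONDITION & SPEC =====
def Spec_get_regional_context_by_state (state_name : String) (out : String) : Prop := out = get_regional_context_by_state_alt state_name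
instance (state_name : String) (out : String) : Decidable (Spec_get_regional_context_by_state state_name out) := by unfold Spec_get_regional_context_by_state; infer_instance

-- ===== CLAIM =====
def Claim_equal_get_regional_context_by_state : Prop := ∀ (state_name : String), Dom_get_regional_context_by_state state_name → Spec_get_regional_context_by_state state_name (get_regional_context_by_state state_name)

-- ===== LEMMAS AND PROOFS =====
-- proof-side: the response table B precomputes, expressed as a comprehension over A's data
def pvFlattenFmt (table : List (String × (List String × String × String))) :
    List (String × String) :=
  table.flatMap (fun zd => zd.2.1.map (fun st => (st, pvFmt zd.1 st zd.2.2.1 zd.2.2.2)))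

theorem pv_find_map (s zone pat sw : String) (states : List String) :
    (states.map (fun st => (st, pvFmt zone st pat sw))).find? (fun p => p.1 == s) =
      if states.contains s then some (s, pvFmt zone s pat sw) else none := by
  induction states with
  | nil => simp
  | cons st rest ih =>
    by_cases h : st = s
    · subst h; simp
    · simp [h, ih, Ne.symm h]

theorem pv_scan_eq_find (s orig : String)
    (table : List (String × (List String × String × String))) :
    pvScanA s orig table =
      (match (pvFlattenFmt table).find? (fun p => p.1 == s) with
       | some p => p.2
       | none => "Regional Context: " ++ orig ++ ". Provide general advice based on India-wide patterns.") := by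
  induction table with
  | nil => simp [pvScanA, pvFlattenFmt]
  | cons zd rest ih =>
    obtain ⟨zone, states, pat, sw⟩ := zd
    have hflat : pvFlattenFmt ((zone, (states, pat, sw)) :: rest) =
        states.map (fun st => (st, pvFmt zone st pat sw)) ++ pvFlattenFmt rest := rfl
    rw [hflat, List.find?_append, pv_find_map]
    by_cases h : s ∈ states
    · simp [pvScanA, h]
    · simp [pvScanA, h, ih]

set_option maxRecDepth 100000 in
set_option maxHeartbeats 2000000 in
theorem pv_responses_eq : pvFlattenFmt pvRegionalData = pvResponses := by decide

-- ===== VERDICT =====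
set_option maxHeartbeats 1000000 in
theorem get_regional_context_by_state_spec : Claim_equal_get_regional_context_by_state := by
  intro state_name _
  unfold Spec_get_regional_context_by_state get_regional_context_by_state
    get_regional_context_by_state_alt
  rw [pv_scan_eq_find, pv_responses_eq]
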